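/-
  SEGMENT R16 OF `start_decoder` (0x11665c – 0x11677f: the body of the channel loop 4158, stb_vorbis_fixed.c 4159 – 4163; 63
  instructions, 5 contract calls — setup_malloc ×3, error, memset —, 8 check sites) SPLIT AT THE RETURNS OF THE THREE setup_malloc
  AND OF memset: the assertions at the four cut points, the claims of the five children, and the composition `SegR16.of_parts`
  (pure logic: `ReachVia.trans`; no machine step).  The cuts are the farm worker's (report start_decoder.R16, attempt 1: `CutA` …
  `CutD` of its Lemmas.lean, its `stage1` = child R16a); all four labels exist in Vorbis/Labels.lean: nothing for `AT`.

      R16a  0x11665c–0x11667b, returns into 0x116680 (cut320)   check load4 `f + 9CH`; `setup_malloc(f, 4·blocksize_1)`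
                                                                exit: AtR16a (the loop assertion at cut320 for the ghost after the call,
                                                                r15 = f + 9CH, rax = NULL or a block since `A9`)
      R16b  0x116680–0x1166bf, returns into 0x1166c4 (cut321)   spill rax to `[R + 10H]`; rbx = i, r12 = i + 6CH, r13 = &channel_buffers[i];
                                                                checked store8 `channel_buffers[i] = …`; check load4 `f + 9CH`;
                                                                `setup_malloc(f, 2·blocksize_1)`
                                                                exit: AtR16b (… + `channel_buffers[i]` NULL or a block, rax likewise)
      R16c  0x1166c4–0x1166f1, returns into 0x1166f6 (cut322)   spill; checked store8 `previous_window[i] = …`;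
                                                                `setup_malloc(f, 2·longest_floorlist)` (esi = 2·dword `[R + 28H]`)
                                                                exit: AtR16c (… + `previous_window[i]`, rax)
      R16d  0x1166f6–0x116776, returns into 0x11677b (cut324)   checked store8 `finalY[i] = r15`; the joint NULL test (two checked load8):
                                                                any NULL: `error(f, 3)`, `jmp 113b22` (exit AtERR, eax = 0, `Failed` by
                                                                `Mid.failed_late`); else check load4 `f + 9CH`,
                                                                `memset(channel_buffers[i], 0, 4·blocksize_1)`
                                                                exit: AtERR ∨ AtR16d (the point at cut324, CH(i + 1), r14 still = i)
      R16e  0x11677b–0x11677f                                   `add r14d, 1 ; jmp 115f97`: the head of loop 4158 with i + 1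
                                                                exit: AtR15 (i + 1)

  WHAT IS LIVE AT THE CUTS (read off c/vorbis_f.dis 11665c … 116784):
      0x116680 (cut320)  reads rax (spilled 0x116680, stored 0x1166a1), r14d (`movsxd rbx, r14d` 0x116685), r15 (= f + 9CH, the check
                         argument at 0x1166a6), rbp, rsp. rbx, r12, r13 are written here, dead before.
      0x1166c4 (cut321)  reads rax (spilled, stored 0x1166e2), rbx (= i: 0x1166c9, 0x1166d0, 0x1166f9), r12 (= i + 6CH: 0x116717), r13
                         (= f + 368H + 8·i: 0x11670f), r14d (0x116721), rbp, rsp, dword `[R + 28H]` (0x1166e7). r15 is dead (0x1166c9).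
      0x1166f6 (cut322)  reads rax (→ r15, stored 0x11670a, tested 0x116740), rbx, r12, r13, r14d, rbp, rsp.
      0x11677b (cut324)  reads r14d (`add r14d, 1`), rbp and rsp (R15 reads them). Everything else is dead (R15 reloads from memory).
  The spill slot `[R + 10H, R + 18H)` is written and re-read inside one child (R16b, R16c): nothing about it crosses a cut.

  EACH ALLOCATION HAS TWO OUTCOMES and the ghost arena grows only on success; the cut assertions are stated for "the ghost of the
  moment" (`∃ A9 A`), and what is known of a pointer of channel `i` is `PendR16`: NULL, or a block allocated since the snapshot `A9`
  (it survives the later growths: `Since.mono`).  The joint NULL test of R16d turns the three `PendR16` into blocks.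

  THE CARRY LEMMAS the children use: Vorbis/Spec/StartDecoderMapMode.lean (`ChanLoop.secPt`, `ChanLoop.of_secPt`, `ChanLoop.carry`,
  `ChanWin`, `ChanWin.fields_same`, `ChanWin.consts_same`) on Vorbis/Spec/StartDecoderMid.lean (`SecPt.alloc_call`, `SecPt.alloc_fail`,
  `FInv.carry`, `Mid.carry_spill`); hints for the workers: farm/hints/start_decoder.R16.md.
-/
import Vorbis.Spec.StartDecoderMapMode
namespace Vorbis.Spec.StartDecoder
open X86 X86.User Asan

/-! ### The assertions at the cut points -/

/-- **A pointer of the running iteration of the channel loop**: NULL (the allocation failed), or the address of a block of `n` bytes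
allocated since the snapshot `A9` and still a block of the current arena. -/
def PendR16 (A9 : Arena) (A : Arena × List Obj) (p n : Nat) : Prop :=
  p = 0 ∨ Since A9 A.1 ⟨p, n⟩

/-- A pending pointer stays one when the ghost arena grows (the next `setup_malloc` succeeded). -/
theorem PendR16.mono {A9 : Arena} {A A' : Arena × List Obj} {p n : Nat} (h : PendR16 A9 A p n) (hext : A.1.Extends A'.1) :
    PendR16 A9 A' p n := by
  rcases h with h0 | hB
  · exact Or.inl h0
  · exact Or.inr (hB.mono hext)

/-- **cut320 (0x116680), the return of `setup_malloc(f, 4·blocksize_1)`**: the invariant of loop 4158 at cut320 for the ghost after the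
call; `i < channels`; r15 = `&f->blocksize_1` (the argument of the check at 0x1166a6); rax = the result. -/
structure BodyR16a (u₀ : State) (g : Ghost) (i : Nat) (A9 : Arena) (A : Arena × List Obj) (v : State) : Prop where
  /-- the loop assertion at cut320 (r14 = i, rbp = f; CH(i) over `Since A9 A.1`) -/
  loop : ChanLoop u₀ g L.start_decoder.cut320 i A9 A v
  /-- the loop test of R15 -/
  lt : (i : Int) < stb_vorbis.channels v.mem g.f
  /-- r15 = f + 9CH (established 0x11665c; read 0x1166a6) -/
  r15 : v.reg .r15 = addr (g.f + 0x9c)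
  /-- rax = `setup_malloc(f, 4·b1)`: NULL or the new block (spilled 0x116680, stored as `channel_buffers[i]` 0x1166a1) -/
  p1 : PendR16 A9 A (v.reg .rax).toNat (4 * bsize v.mem g.f 1)

/-- `AtR16a u₀ g i v`: the exit assertion of `start_decoder.R16a`, the entry assertion of `start_decoder.R16b`. -/
def AtR16a (u₀ : State) (g : Ghost) (i : Nat) (v : State) : Prop := ∃ A9 A, BodyR16a u₀ g i A9 A v

/-- **cut321 (0x1166c4), the return of `setup_malloc(f, 2·blocksize_1)`**: `channel_buffers[i]` is stored (0x1166a1); rbx = i,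
r12 = i + 6CH, r13 = `&f->channel_buffers[i]`; rax = the result. -/
structure BodyR16b (u₀ : State) (g : Ghost) (i : Nat) (A9 : Arena) (A : Arena × List Obj) (v : State) : Prop where
  /-- the loop assertion at cut321 -/
  loop : ChanLoop u₀ g L.start_decoder.cut321 i A9 A v
  /-- the loop test of R15 -/
  lt : (i : Int) < stb_vorbis.channels v.mem g.f
  /-- rbx = i (`movsxd rbx, r14d` 0x116685; read 0x1166c9, 0x1166d0, 0x1166f9) -/
  rbx : v.reg .rbx = addr i
  /-- r12 = i + 6CH (0x116688; read 0x116717: `[rbp + r12·8 + 8]` = `channel_buffers[i]`) -/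
  r12 : v.reg .r12 = addr (i + 0x6c)
  /-- r13 = f + 368H + 8·i = `&f->channel_buffers[i]` (0x11668c; the check argument at 0x11670f) -/
  r13 : v.reg .r13 = addr (g.f + 0x368 + 8 * i)
  /-- `channel_buffers[i]` (stored 0x1166a1): NULL or a block of `4·b1` bytes -/
  cb : PendR16 A9 A (stb_vorbis.channel_buffers v.mem g.f i) (4 * bsize v.mem g.f 1)
  /-- rax = `setup_malloc(f, 2·b1)` (spilled 0x1166c4, stored as `previous_window[i]` 0x1166e2) -/
  p2 : PendR16 A9 A (v.reg .rax).toNat (2 * bsize v.mem g.f 1)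

/-- `AtR16b u₀ g i v`: the exit assertion of `start_decoder.R16b`, the entry assertion of `start_decoder.R16c`. -/
def AtR16b (u₀ : State) (g : Ghost) (i : Nat) (v : State) : Prop := ∃ A9 A, BodyR16b u₀ g i A9 A v

/-- **cut322 (0x1166f6), the return of `setup_malloc(f, 2·longest_floorlist)`**: `previous_window[i]` is stored too (0x1166e2); rax = the
result, a block of `2·dword [R + 28H]` bytes (`mid.lfl`: `2 ≤ longest_floorlist ≤ 250`). -/
structure BodyR16c (u₀ : State) (g : Ghost) (i : Nat) (A9 : Arena) (A : Arena × List Obj) (v : State) : Prop where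
  /-- the loop assertion at cut322 -/
  loop : ChanLoop u₀ g L.start_decoder.cut322 i A9 A v
  /-- the loop test of R15 -/
  lt : (i : Int) < stb_vorbis.channels v.mem g.f
  /-- rbx = i (read 0x1166f9: `add rbx, 9EH`) -/
  rbx : v.reg .rbx = addr i
  /-- r12 = i + 6CH (read 0x116717) -/
  r12 : v.reg .r12 = addr (i + 0x6c)
  /-- r13 = `&f->channel_buffers[i]` (read 0x11670f) -/
  r13 : v.reg .r13 = addr (g.f + 0x368 + 8 * i)
  /-- `channel_buffers[i]`: NULL or a block of `4·b1` bytes (re-read 0x116717, tested 0x11671c) -/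
  cb : PendR16 A9 A (stb_vorbis.channel_buffers v.mem g.f i) (4 * bsize v.mem g.f 1)
  /-- `previous_window[i]` (stored 0x1166e2): NULL or a block of `2·b1` bytes (tested 0x116738) -/
  pw : PendR16 A9 A (stb_vorbis.previous_window v.mem g.f i) (2 * bsize v.mem g.f 1)
  /-- rax = `setup_malloc(f, 2·LF)` (moved to r15 0x1166f6, stored as `finalY[i]` 0x11670a, tested 0x116740) -/
  p3 : PendR16 A9 A (v.reg .rax).toNat (2 * (v.mem.i32 (g.R + 0x28)).toNat)

/-- `AtR16c u₀ g i v`: the exit assertion of `start_decoder.R16c`, the entry assertion of `start_decoder.R16d`. -/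
def AtR16c (u₀ : State) (g : Ghost) (i : Nat) (v : State) : Prop := ∃ A9 A, BodyR16c u₀ g i A9 A v

/-- **cut324 (0x11677b), the return of `memset(channel_buffers[i], 0, 4·blocksize_1)`** (the success arm of the joint NULL test): the
point of the channel loop at cut324; r14 is STILL `i`; the three buffers of channel `i` are blocks: CH(i + 1). Two instructions
(`add r14d, 1 ; jmp 115f97`) lead to `AtR15 (i + 1)`. -/
structure BodyR16d (u₀ : State) (g : Ghost) (i : Nat) (A9 : Arena) (A : Arena × List Obj) (v : State) : Prop where
  /-- the point at cut324 (`Frame`, `Hand`, `Mid g 9 9 10` over the snapshot `A9`, rbp = f) -/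
  pt : SecPt u₀ g L.start_decoder.cut324 9 9 10 A9 A v
  /-- r14d = i (incremented by R16e) -/
  r14 : v.reg .r14 = addr i
  /-- the loop test of R15: gives `i + 1 ≤ channels` -/
  lt : (i : Int) < stb_vorbis.channels v.mem g.f
  /-- M7: `previous_length = 0` -/
  prev0 : stb_vorbis.previous_length v.mem g.f = 0
  /-- M6 below `i + 1` -/
  chan : Mdct.ChanUpTo (Since A9 A.1) v.mem g.f (i + 1)
  /-- FY1 below `i + 1` -/
  fy : FYUpTo (Since A9 A.1) v.mem g.f (v.mem.i32 (g.R + 0x28)) (i + 1)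

/-- `AtR16d u₀ g i v`: an exit assertion of `start_decoder.R16d`, the entry assertion of `start_decoder.R16e`. -/
def AtR16d (u₀ : State) (g : Ghost) (i : Nat) (v : State) : Prop := ∃ A9 A, BodyR16d u₀ g i A9 A v

/-! ### The claims of the children -/

/-- **Segment `start_decoder.R16a`** (0x11665c – 0x11667b): the check of `f->blocksize_1`, `setup_malloc(f, 4·blocksize_1)`; exit at its
return with the loop assertion for the ghost after the call and the result in rax. -/
def SegR16a (Lay : Layout) (μ : Microarch) (u₀ : State) : Prop :=
  ∀ (g : Ghost) (i : Nat) (v : State), AtR16 u₀ g i v → ReachVia Lay μ WayInv v (fun w => AtR16a u₀ g i w)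

/-- **Segment `start_decoder.R16b`** (0x116680 – 0x1166bf): `f->channel_buffers[i] = rax` (checked store8), `setup_malloc(f,
2·blocksize_1)`; exit at its return. -/
def SegR16b (Lay : Layout) (μ : Microarch) (u₀ : State) : Prop :=
  ∀ (g : Ghost) (i : Nat) (v : State), AtR16a u₀ g i v → ReachVia Lay μ WayInv v (fun w => AtR16b u₀ g i w)

/-- **Segment `start_decoder.R16c`** (0x1166c4 – 0x1166f1): `f->previous_window[i] = rax` (checked store8), `setup_malloc(f,
2·longest_floorlist)`; exit at its return. -/
def SegR16c (Lay : Layout) (μ : Microarch) (u₀ : State) : Prop :=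
  ∀ (g : Ghost) (i : Nat) (v : State), AtR16b u₀ g i v → ReachVia Lay μ WayInv v (fun w => AtR16c u₀ g i w)

/-- **Segment `start_decoder.R16d`** (0x1166f6 – 0x116776): `f->finalY[i] = rax` (checked store8); the joint NULL test; a NULL:
`error(f, VORBIS_outofmem)`, `jmp` to the epilogue (`AtERR`, eax = 0, `Failed`); else `memset(channel_buffers[i], 0, 4·blocksize_1)`; exit
at its return with CH(i + 1). -/
def SegR16d (Lay : Layout) (μ : Microarch) (u₀ : State) : Prop :=
  ∀ (g : Ghost) (i : Nat) (v : State), AtR16c u₀ g i v → ReachVia Lay μ WayInv v (fun w => AtR16d u₀ g i w ∨ AtERR u₀ g w)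

/-- **Segment `start_decoder.R16e`** (0x11677b – 0x11677f): `add r14d, 1 ; jmp 115f97`: the head of loop 4158 with `i + 1` (no memory
change: `ChanLoop` from the fields of `BodyR16d`). -/
def SegR16e (Lay : Layout) (μ : Microarch) (u₀ : State) : Prop :=
  ∀ (g : Ghost) (i : Nat) (v : State), AtR16d u₀ g i v → ReachVia Lay μ WayInv v (fun w => AtR15 u₀ g (i + 1) w)

/-! ### The composition -/

/-- **THE COMPOSITION of the split of segment R16**: a → b → c → d → (e ∨ the epilogue). Pure logic: no machine step. -/
theorem SegR16.of_parts {Lay : Layout} {μ : Microarch} {u₀ : State}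
    (ha : SegR16a Lay μ u₀) (hb : SegR16b Lay μ u₀) (hc : SegR16c Lay μ u₀) (hd : SegR16d Lay μ u₀)
    (he : SegR16e Lay μ u₀) : SegR16 Lay μ u₀ := by
  intro g i v hv
  refine (ha g i v hv).trans ?_
  intro w1 h1
  refine (hb g i w1 h1).trans ?_
  intro w2 h2
  refine (hc g i w2 h2).trans ?_
  intro w3 h3
  refine (hd g i w3 h3).trans ?_
  intro w4 h4
  rcases h4 with h4d | herr
  · exact (he g i w4 h4d).mono (fun _ hx => Or.inl hx)
  · exact ReachVia.done (Or.inr herr)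

/-! ### The hand-over to the loop head, as pure logic (the content of child R16e) -/

namespace R16

/-- **From `BodyR16d` to the loop assertion with `i + 1`** at a state with the same memory (R16e: `add r14d, 1 ; jmp 115f97` writes no
memory): `hpt` = the point at the new state (`SecPt.carry` over the empty footprint, or field by field), `hr14` = the incremented
counter. -/
theorem toR15 {u₀ : State} {g : Ghost} {i : Nat} {A9 : Arena} {A : Arena × List Obj} {v w : State}
    (h : BodyR16d u₀ g i A9 A v) (hmem : w.mem = v.mem) (hpt : SecPt u₀ g pc_R15 9 9 10 A9 A w)
    (hr14 : w.reg .r14 = addr (i + 1)) : AtR15 u₀ g (i + 1) w := by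
  refine ⟨A9, A, ?_⟩
  have hlt := h.lt
  exact
    { frame := hpt.frame
      hand := hpt.hand
      mid := hpt.mid
      rbp := hpt.rbp
      r14 := hr14
      i_le := by
        rw [hmem]
        omega
      prev0 := by
        rw [hmem]
        exact h.prev0
      chan := by
        rw [hmem]
        exact h.chan
      fy := by
        rw [hmem]
        exact h.fy }

end R16

end Vorbis.Spec.StartDecoder
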